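-- pv_equiv track=rewrite | github.com/GodoyPedro/MultiTool | multi_tool.py | __formatear_existencia_properties
-- ===== SOURCE A (Python) =====
-- def __formatear_existencia_properties(dict_xmls):
--     """
--     Devuelve una cadena de texto de una sola linea con espacios y "\n" y una lista de posiciones.
--     Estas posiciones hacen referencia a la posicion del nombre del archivo
--     dentro de la cadena de texto de una sola linea
--     El proposito es colorear los nombres de los archivos utilizando las posiciones retornadas.
--
--     Args:
--         dict_xmls (dict[str,list[str]]): Diccionario donde se especifica el nombre del archivo como clave
--     y como valor, una lista de las propiedades correspondientes a dicho archivo.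
--
--     Returns:
--         tuple[str,list[list[int,int]]]: Una cadena de texto de una sola linea con espacios y "\n" y una lista de posiciones.
--     """
--     posiciones_a_colorear = []
--     string_a_devolver = ""
--     fila = 1
--     for nombre, properties in dict_xmls.items():
--         if properties:
--             fila += 1
--             string_a_devolver += "\n"
--             string_a_devolver += nombre + "\n"
--             posiciones_a_colorear.append([fila,len(nombre)])
--             for prop in properties:
--                 string_a_devolver += f"    {prop}\n"
--                 fila += 1
--             fila += 1
--     return string_a_devolver, posiciones_a_colorear
-- ===== SOURCE B (Python) =====
-- def __formatear_existencia_properties(dict_xmls):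
--     lines = []
--     posiciones = []
--     for nombre, properties in dict_xmls.items():
--         if properties:
--             lines.append("")
--             posiciones.append([len(lines) + 1, len(nombre)])
--             lines.append(nombre)
--             lines.extend("    " + prop for prop in properties)
--     return ("\n".join(lines) + "\n" if lines else "", posiciones)
-- ===== Notes on version B (the rewrite author's own statement) =====
-- stated objective: simpler
-- what changed: B accumulates a list of output lines and derives each filename's line number from the current list length, joining once at the end, instead of A's string concatenation plus a hand-incremented 'fila' counter threaded through nested loops.
import Mathlib
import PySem

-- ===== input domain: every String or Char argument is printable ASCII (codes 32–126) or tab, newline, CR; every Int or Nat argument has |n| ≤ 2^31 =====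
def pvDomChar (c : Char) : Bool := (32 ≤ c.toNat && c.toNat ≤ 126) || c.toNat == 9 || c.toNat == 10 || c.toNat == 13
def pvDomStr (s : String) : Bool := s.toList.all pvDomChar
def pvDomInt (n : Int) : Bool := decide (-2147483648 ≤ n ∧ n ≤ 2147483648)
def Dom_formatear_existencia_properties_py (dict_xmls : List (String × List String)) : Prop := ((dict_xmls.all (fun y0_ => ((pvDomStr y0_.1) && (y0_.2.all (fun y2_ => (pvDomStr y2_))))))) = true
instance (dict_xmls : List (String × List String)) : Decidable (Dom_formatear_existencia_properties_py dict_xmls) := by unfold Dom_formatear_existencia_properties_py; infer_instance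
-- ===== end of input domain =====

-- B replaces A's string concatenation + hand-incremented row counter by a list of lines
-- whose length yields each filename's row, joined once at the end (objective: simpler).

-- ===== PORT A =====
-- one iteration of A's outer loop over (nombre, properties); state = (posiciones, string, fila)
def pvStepA (st : List (List Int) × String × Int) (pr : String × List String) :
    List (List Int) × String × Int :=
  if pr.2 ≠ [] then
    let fila1 := st.2.2 + 1
    let s1 := st.2.1 ++ "\n" ++ (pr.1 ++ "\n")
    let pos1 := st.1 ++ [[fila1, PySem.Str.len pr.1]]
    let inner := pr.2.foldl (fun (sf : String × Int) prop =>
      (sf.1 ++ ("    " ++ prop ++ "\n"), sf.2 + 1)) (s1, fila1)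
    (pos1, inner.1, inner.2 + 1)
  else st

def formatear_existencia_properties_py (dict_xmls : List (String × List String)) : String × List (List Int) :=
  let st := dict_xmls.foldl pvStepA ([], "", 1)
  (st.2.1, st.1)

-- ===== PORT B =====
-- one iteration of B's loop; state = (lines, posiciones)
def pvStepB (st : List String × List (List Int)) (pr : String × List String) :
    List String × List (List Int) :=
  if pr.2 ≠ [] then
    let lines1 := st.1 ++ [""]
    let pos1 := st.2 ++ [[(lines1.length : Int) + 1, PySem.Str.len pr.1]]
    let lines2 := lines1 ++ [pr.1] ++ pr.2.map (fun p => "    " ++ p)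
    (lines2, pos1)
  else st

def formatear_existencia_properties_py_alt (dict_xmls : List (String × List String)) : String × List (List Int) :=
  let st := dict_xmls.foldl pvStepB ([], [])
  (if st.1 ≠ [] then PySem.Str.join "\n" st.1 ++ "\n" else "", st.2)

-- ===== PRECONDITION & SPEC =====
def Spec_formatear_existencia_properties_py (dict_xmls : List (String × List String)) (out : String × List (List Int)) : Prop := out = formatear_existencia_properties_py_alt dict_xmls
instance (dict_xmls : List (String × List String)) (out : String × List (List Int)) : Decidable (Spec_formatear_existencia_properties_py dict_xmls out) := by unfold Spec_formatear_existencia_properties_py; infer_instance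

-- ===== CLAIM (what is proved, stated in full; the proofs are below) =====
def Claim_equal_formatear_existencia_properties_py : Prop := ∀ (dict_xmls : List (String × List String)), Dom_formatear_existencia_properties_py dict_xmls → Spec_formatear_existencia_properties_py dict_xmls (formatear_existencia_properties_py dict_xmls)

-- ===== LEMMAS AND PROOFS =====

-- render ls = concatenation of (line ++ "\n") over ls; "\n".join(ls) ++ "\n" for nonempty ls.
def pvRender : List String → String
  | [] => ""
  | l :: ls => l ++ "\n" ++ pvRender ls

theorem pvRender_append (a b : List String) : pvRender (a ++ b) = pvRender a ++ pvRender b := by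
  induction a with
  | nil => simp [pvRender]
  | cons x xs ih =>
      apply String.toList_inj.mp
      simp [pvRender, ih]

theorem pvJoin_render (ls : List String) (h : ls ≠ []) :
    PySem.Str.join "\n" ls ++ "\n" = pvRender ls := by
  induction ls with
  | nil => exact absurd rfl h
  | cons a t ih =>
      cases t with
      | nil =>
          apply String.toList_inj.mp
          simp [pvRender, PySem.Str.toList_join, PySem.Chars.join_singleton]
      | cons b t' =>
          apply String.toList_inj.mp
          have := String.toList_inj.mpr (ih (by simp))
          simp [pvRender, PySem.Str.toList_join, PySem.Chars.join_cons_cons] at *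
          simp [← this]

-- A's inner loop over the properties appends the rendered indented lines and advances fila by their count.
theorem pvInner (props : List String) (s : String) (f : Int) :
    props.foldl (fun (sf : String × Int) prop =>
        (sf.1 ++ ("    " ++ prop ++ "\n"), sf.2 + 1)) (s, f)
      = (s ++ pvRender (props.map (fun p => "    " ++ p)), f + props.length) := by
  induction props generalizing s f with
  | nil => simp [pvRender]
  | cons p ps ih =>
      simp only [List.foldl_cons, List.map_cons, pvRender, List.length_cons, ih, Prod.mk.injEq]
      refine ⟨?_, ?_⟩
      · apply String.toList_inj.mp; simp
      · push_cast; ring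

theorem pvStepA_eq (lines : List String) (pos : List (List Int)) (pr : String × List String)
    (hp : pr.2 ≠ []) :
    pvStepA (pos, pvRender lines, (lines.length : Int) + 1) pr
      = (pos ++ [[((lines ++ [""]).length : Int) + 1, PySem.Str.len pr.1]],
         pvRender ((lines ++ [""]) ++ [pr.1] ++ pr.2.map (fun p => "    " ++ p)),
         (((lines ++ [""]) ++ [pr.1] ++ pr.2.map (fun p => "    " ++ p)).length : Int) + 1) := by
  simp only [pvStepA, ne_eq, hp, not_false_eq_true, if_true, pvInner, Prod.mk.injEq]
  refine ⟨?_, ?_, ?_⟩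
  · congr 3
    simp only [List.length_append, List.length_cons, List.length_nil]
    push_cast; ring
  · simp only [pvRender_append, pvRender]
    apply String.toList_inj.mp; simp
  · simp only [List.length_append, List.length_cons, List.length_nil, List.length_map]
    push_cast; ring

theorem pvStepB_eq (lines : List String) (pos : List (List Int)) (pr : String × List String)
    (hp : pr.2 ≠ []) :
    pvStepB (lines, pos) pr
      = ((lines ++ [""]) ++ [pr.1] ++ pr.2.map (fun p => "    " ++ p),
         pos ++ [[((lines ++ [""]).length : Int) + 1, PySem.Str.len pr.1]]) := by
  simp only [pvStepB, ne_eq, hp, not_false_eq_true, if_true]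

theorem pvStepA_skip (st : List (List Int) × String × Int) (pr : String × List String)
    (hp : pr.2 = []) : pvStepA st pr = st := by
  simp [pvStepA, hp]

theorem pvStepB_skip (st : List String × List (List Int)) (pr : String × List String)
    (hp : pr.2 = []) : pvStepB st pr = st := by
  simp [pvStepB, hp]

-- Loop invariant: A's state is (B's posiciones, render of B's lines, B's lines-count + 1).
theorem pvInv (l : List (String × List String)) (lines : List String) (pos : List (List Int)) :
    l.foldl pvStepA (pos, pvRender lines, (lines.length : Int) + 1)
      = ((l.foldl pvStepB (lines, pos)).2,
         pvRender (l.foldl pvStepB (lines, pos)).1,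
         ((l.foldl pvStepB (lines, pos)).1.length : Int) + 1) := by
  induction l generalizing lines pos with
  | nil => simp
  | cons pr rest ih =>
      by_cases hp : pr.2 = []
      · rw [List.foldl_cons, List.foldl_cons, pvStepA_skip _ _ hp, pvStepB_skip _ _ hp]
        exact ih lines pos
      · rw [List.foldl_cons, List.foldl_cons, pvStepA_eq lines pos pr hp, pvStepB_eq lines pos pr hp]
        exact ih _ _

-- ===== VERDICT (by name: the statement is the Claim_ definition above) =====
theorem formatear_existencia_properties_py_spec : Claim_equal_formatear_existencia_properties_py := by
  intro dict_xmls _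
  unfold Spec_formatear_existencia_properties_py
  unfold formatear_existencia_properties_py formatear_existencia_properties_py_alt
  have h := pvInv dict_xmls [] []
  simp only [List.length_nil, Nat.cast_zero, zero_add] at h
  have h0 : pvRender ([] : List String) = "" := rfl
  rw [h0] at h
  rw [h]
  by_cases hne : (dict_xmls.foldl pvStepB ([], [])).1 = []
  · simp [hne, pvRender]
  · simp only [hne, ne_eq, not_false_eq_true, if_true]
    rw [pvJoin_render _ hne]
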